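-- pv_equiv track=rewrite | github.com/AaronFive/paramatch | heuristicAlignment.py | stringToIntegerList
-- ===== SOURCE A (Python) =====
-- def stringToIntegerList(a):
--     """Returns a as a list of integers, each letter corresponding to an integer, ordered by first appearance in a.
--     Args:
--         a(str)
--     Returns:
--         list: a as a list of integers
--     """
--     integerList = []
--     charSet = {}
--     charNb = 0
--     for letter in a:
--         if letter not in charSet:
--             charSet[letter] = charNb
--             charNb += 1
--         integerList.append(charSet[letter])
--     return integerList
-- ===== SOURCE B (Python) =====
-- def stringToIntegerList(a):
--     """Per-character closed form: the code of a character is the number of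
--     distinct characters occurring strictly before its first occurrence in a."""
--     return [len(set(a[:a.index(c)])) for c in a]
-- ===== Notes on version B (the rewrite author's own statement) =====
-- stated objective: alternative
-- what changed: Replaces A's stateful single pass (dict of seen characters plus a running counter, emitting codes as it goes) by a stateless per-character closed form: the code of each character is len(set(a[:a.index(c)])), the number of distinct characters strictly before its first occurrence.
import Mathlib
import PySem

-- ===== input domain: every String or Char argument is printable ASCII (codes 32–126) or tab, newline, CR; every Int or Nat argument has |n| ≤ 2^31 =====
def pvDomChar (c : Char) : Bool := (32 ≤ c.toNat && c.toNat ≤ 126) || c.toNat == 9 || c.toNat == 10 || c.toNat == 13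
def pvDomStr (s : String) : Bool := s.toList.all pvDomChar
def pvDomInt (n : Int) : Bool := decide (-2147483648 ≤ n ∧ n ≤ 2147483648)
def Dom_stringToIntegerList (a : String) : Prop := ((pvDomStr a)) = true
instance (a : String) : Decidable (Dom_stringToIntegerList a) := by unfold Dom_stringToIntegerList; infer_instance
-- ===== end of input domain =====

-- B replaces A's stateful build-as-you-go loop by a stateless per-character formula:
-- code(c) = number of distinct characters strictly before c's first occurrence.

-- ===== PORT A =====
-- One interleaved loop: state = (integerList, charSet, charNb); conditional insert,
-- then append charSet[letter] (the key is always present; ported as getD with unused default 0).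
def stringToIntegerList (a : String) : List Int :=
  (a.toList.foldl
    (fun (st : List Int × PySem.Dict Char Int × Int) letter =>
      let st' :=
        if st.2.1.contains letter then (st.2.1, st.2.2)
        else (st.2.1.insert letter st.2.2, st.2.2 + 1)
      (st.1 ++ [st'.1.getD letter 0], st'.1, st'.2))
    ([], PySem.Dict.empty, 0)).1

-- ===== PORT B =====
-- [len(set(a[:a.index(c)])) for c in a]: a.index(c) for a single character c equals
-- list(a).index(c) (exact; c ∈ a so .index never raises, ported as index? with unused
-- default 0); the slice a[:k] with k ≥ 0 is take k; len(set(…)) is PySem.Set.len∘ofList.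
def stringToIntegerList_alt (a : String) : List Int :=
  a.toList.map (fun c =>
    PySem.Set.len
      (PySem.Set.ofList
        (a.toList.take ((PySem.List.index? a.toList c).getD 0))))

-- ===== PRECONDITION & SPEC =====
def Spec_stringToIntegerList (a : String) (out : List Int) : Prop := out = stringToIntegerList_alt a
instance (a : String) (out : List Int) : Decidable (Spec_stringToIntegerList a out) := by unfold Spec_stringToIntegerList; infer_instance

-- ===== CLAIM =====
def Claim_equal_stringToIntegerList : Prop := ∀ (a : String), Dom_stringToIntegerList a → Spec_stringToIntegerList a (stringToIntegerList a)

-- ===== LEMMAS AND PROOFS =====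

-- the seen-set only grows: fs is a prefix of the final set
lemma pvFF_prefix (l fs : List Char) : ∃ u, l.foldl PySem.Set.add fs = fs ++ u := by
  induction l generalizing fs with
  | nil => exact ⟨[], by simp⟩
  | cons c t ih =>
    simp only [List.foldl_cons, PySem.Set.add]
    split
    · exact ih fs
    · obtain ⟨u, hu⟩ := ih (fs ++ [c])
      exact ⟨c :: u, by simp [hu]⟩

-- the first-appearance index is stable once the character is present
lemma pvIndex_stable (l fs : List Char) (c : Char) (h : c ∈ fs) :
    PySem.List.index? (l.foldl PySem.Set.add fs) c = PySem.List.index? fs c := by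
  obtain ⟨u, hu⟩ := pvFF_prefix l fs
  rw [hu, PySem.List.index?_append_of_mem u h]

-- main loop invariant: A's fold, started from a dict tabulating the first-appearance
-- indices of fs, emits the first-appearance index (in the FINAL seen-set) of each character
lemma pvLoop (l fs : List Char) (out : List Int) (d : PySem.Dict Char Int) (n : Int)
    (hn : n = (fs.length : Int))
    (hcont : ∀ c, d.contains c = decide (c ∈ fs))
    (hget : ∀ c, c ∈ fs → d.getD c 0 = (((PySem.List.index? fs c).getD 0 : Nat) : Int)) :
    (l.foldl
      (fun (st : List Int × PySem.Dict Char Int × Int) letter =>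
        let st' :=
          if st.2.1.contains letter then (st.2.1, st.2.2)
          else (st.2.1.insert letter st.2.2, st.2.2 + 1)
        (st.1 ++ [st'.1.getD letter 0], st'.1, st'.2))
      (out, d, n)).1
    = out ++ l.map (fun c => (((PySem.List.index? (l.foldl PySem.Set.add fs) c).getD 0 : Nat) : Int)) := by
  induction l generalizing fs out d n with
  | nil => simp
  | cons c t ih =>
    simp only [List.foldl_cons, List.map_cons]
    by_cases hc : c ∈ fs
    · have hcc : d.contains c = true := by rw [hcont]; simpa
      have hstep : PySem.Set.add fs c = fs := PySem.Set.add_of_mem hc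
      simp only [hcc, if_true]
      rw [ih fs (out ++ [d.getD c 0]) d n hn hcont hget,
        hget c hc, hstep, pvIndex_stable t fs c hc, List.append_assoc]
      rfl
    · have hcc : d.contains c = false := by rw [hcont]; simpa
      have hstep : PySem.Set.add fs c = fs ++ [c] := PySem.Set.add_of_not_mem hc
      have hidx : PySem.List.index? (fs ++ [c]) c = some fs.length :=
        PySem.List.index?_append_singleton_self fs c hc
      have hcont' : ∀ x, (d.insert c n).contains x = decide (x ∈ fs ++ [c]) := by
        intro x
        rw [PySem.Dict.contains_insert, hcont]
        by_cases hx : x = c <;> simp [hx]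
      have hget' : ∀ x, x ∈ fs ++ [c] →
          (d.insert c n).getD x 0 = (((PySem.List.index? (fs ++ [c]) x).getD 0 : Nat) : Int) := by
        intro x hx
        rw [PySem.Dict.getD_insert]
        by_cases hxc : x = c
        · subst hxc; rw [if_pos rfl, hidx]; simp [hn]
        · have hxf : x ∈ fs := by
            rcases List.mem_append.mp hx with h | h
            · exact h
            · simp at h; exact absurd h hxc
          rw [if_neg hxc, PySem.List.index?_append_of_mem [c] hxf]
          exact hget x hxf
      simp only [hcc, Bool.false_eq_true, if_false]
      rw [ih (fs ++ [c]) (out ++ [(d.insert c n).getD c 0]) (d.insert c n) (n + 1)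
        (by simp [hn]) hcont' hget',
        hget' c (by simp), hstep,
        pvIndex_stable t (fs ++ [c]) c (by simp), List.append_assoc]
      rfl

-- characterisation of the first-appearance code: for c ∈ t, the index of c in the
-- ordered set of t's characters is the number of distinct characters before c's
-- first occurrence in t — exactly B's formula.
lemma pvIndex_ofList (t : List Char) (c : Char) (h : c ∈ t) :
    PySem.List.index? (PySem.Set.ofList t) c
      = some (PySem.Set.ofList (t.take ((PySem.List.index? t c).getD 0))).length := by
  have hsome : ∃ k, PySem.List.index? t c = some k := by
    have := PySem.List.index?_isSome_iff (xs := t) (v := c)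
    rcases hh : PySem.List.index? t c with _ | k
    · rw [hh] at this; simp at this; exact absurd h this
    · exact ⟨k, rfl⟩
  obtain ⟨k, hk⟩ := hsome
  obtain ⟨pre, suf, ht, hlen, hnp⟩ := (PySem.List.index?_eq_some_iff t c k).mp hk
  have htake : t.take k = pre := by
    rw [ht, ← hlen]; simp
  have hnop : c ∉ PySem.Set.ofList pre := by
    intro hx; exact hnp ((PySem.Set.mem_ofList pre c).mp hx)
  have hofl : PySem.Set.ofList t
      = (PySem.Set.ofList pre ++ [c]) ++ ((PySem.Set.ofList suf).filter
          (fun y => !(PySem.Set.contains (PySem.Set.ofList pre ++ [c]) y))) := by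
    have h1 : t = (pre ++ [c]) ++ suf := by rw [ht]; simp
    rw [h1, PySem.Set.ofList_append, PySem.Set.update_eq_append_filter,
      PySem.Set.ofList_append_singleton, PySem.Set.add_of_not_mem hnop]
  rw [hk, hofl, Option.getD_some, htake,
    PySem.List.index?_append_of_mem _ (by simp),
    PySem.List.index?_append_singleton_self _ _ hnop]

-- ===== VERDICT (by name: the statement is the Claim_ definition above) =====
theorem stringToIntegerList_spec : Claim_equal_stringToIntegerList := by
  intro a _
  unfold Spec_stringToIntegerList stringToIntegerList stringToIntegerList_alt
  rw [pvLoop a.toList [] [] PySem.Dict.empty 0 (by simp)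
      (by intro c; simp [PySem.Dict.contains_empty])
      (by intro c h; simp at h)]
  simp only [List.nil_append]
  refine List.map_congr_left ?_
  intro c hc
  have h1 : a.toList.foldl PySem.Set.add [] = PySem.Set.ofList a.toList :=
    (PySem.Set.ofList_eq_foldl a.toList).symm
  rw [h1, pvIndex_ofList a.toList c hc]
  simp [PySem.Set.len]
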